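-- pv_equiv track=rewrite | github.com/seoyoung7623/AlgorithmPractice | 그리디알고리즘/Programmers/광물캐기.py | solution
-- ===== SOURCE A (Python) =====
-- def solution(picks, minerals):
--     answer = 0
--     sum = 0
--     # 1. 곡갱이의 수 *5 만큼 광석을 캘수 있다.
--     for i in picks:
--         sum += i*5
--     # 총 개수보다 큰 경우 잘라준다. 뒤에는 사용할 수 없기 때문
--     if sum<len(minerals):
--         minerals = minerals[:sum]
--
--     # 광물을 연속해서 5개 캐야하므로 5개씩 잘라서 리스트에 저장해준다!
--     new_minerals = [[0,0,0] for _ in range(len(minerals)//5 + 1)]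
--
--     for i in range(len(minerals)):
--         if minerals[i] == 'diamond':
--             new_minerals[i//5][0] += 1 #5개씩이므로 앞인덱스는 i//5!
--         elif minerals[i] == 'iron':
--             new_minerals[i//5][1] += 1
--         elif minerals[i] == 'stone':
--             new_minerals[i//5][2] += 1
--
--     # 광물을 다이아,철,돌 순서대로 정렬! lamba에서 -x 음수 사용 주의(큰수부터 나열하기 위해)
--     new_minerals.sort(key=lambda x:(-x[0],-x[1],-x[2]))
--
--     #광문 다이아,철,돌 순서대로 캔다. 그리디접근
--     #광물들을 기준으로 도구를 반복!
--     for i in new_minerals: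
--         dia,iron,stone = i
--         for j in range(len(picks)): # 광물리스트안에 곡갱이 리스트 이중반복문 설계 주의
--             if picks[j]>0 and j==0: # j==0: 다이아몬드도구인 경우!
--                 picks[j] -= 1
--                 answer += dia + iron + stone
--                 break
--             elif picks[j] > 0 and j ==1:
--                 picks[j] -= 1
--                 answer += dia*5 + iron + stone
--                 break
--             elif picks[j] > 0 and j == 2:
--                 picks[j] -= 1
--                 answer += dia*25 + 5*iron + stone
--                 break
--
--     return answer
-- ===== SOURCE B (Python) =====
-- def solution(picks, minerals):
--     # return-value equivalent to A; does not mutate `picks` in place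
--     cap = 5 * sum(picks)
--     if cap < len(minerals):
--         minerals = minerals[:cap]
--     # per-block counts via slicing (block b = minerals[5b:5b+5])
--     blocks = []
--     for b in range(len(minerals) // 5 + 1):
--         chunk = minerals[5 * b:5 * b + 5]
--         blocks.append((chunk.count('diamond'), chunk.count('iron'), chunk.count('stone')))
--     # no sort: repeatedly extract the lexicographically largest remaining block
--     # and serve it with the strongest remaining pick (diamond, then iron, then stone)
--     total = 0
--     for w, p in zip(((1, 1, 1), (5, 1, 1), (25, 5, 1)), picks):
--         while p > 0 and blocks:
--             p -= 1
--             best = blocks[0]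
--             for t in blocks[1:]:
--                 if t > best:
--                     best = t
--             blocks.remove(best)
--             total += best[0] * w[0] + best[1] * w[1] + best[2] * w[2]
--     return total
-- ===== Notes on version B (the rewrite author's own statement) =====
-- stated objective: alternative
-- what changed: B never sorts and keeps no i//5 bucket table: it counts each 5-block by slicing with .count, then repeatedly extracts the lexicographically largest remaining block by a linear max-scan and serves it with the current pick tier (a selection greedy over at most the first three picks), instead of A's sort by (-d,-i,-s) followed by a loop over every block that rescans and mutates the whole picks list; return value is identical, but B does not mutate picks in place.
import Mathlib
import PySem

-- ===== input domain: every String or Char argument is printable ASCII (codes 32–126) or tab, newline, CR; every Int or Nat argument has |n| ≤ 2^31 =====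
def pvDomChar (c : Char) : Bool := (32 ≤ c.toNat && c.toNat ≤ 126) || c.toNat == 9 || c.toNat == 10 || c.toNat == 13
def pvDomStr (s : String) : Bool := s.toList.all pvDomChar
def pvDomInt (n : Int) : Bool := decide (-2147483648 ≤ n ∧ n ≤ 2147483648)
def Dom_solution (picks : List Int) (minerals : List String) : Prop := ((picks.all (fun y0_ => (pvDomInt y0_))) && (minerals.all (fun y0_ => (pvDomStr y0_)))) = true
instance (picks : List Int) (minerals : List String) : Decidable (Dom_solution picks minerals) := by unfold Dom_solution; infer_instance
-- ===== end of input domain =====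

-- B drops A's sort and i//5 bucket table: it counts each 5-block by slicing, then repeatedly
-- extracts the lexicographically largest remaining block by a max-scan and serves it with the
-- current pick tier; equivalence is about the RETURN value only: A decrements `picks` in
-- place, B does not.

-- ===== PORT A =====
-- Python tuple '<' on the negated-Int key (-d,-i,-s): lexicographic; hand-ported exactly.
def pvKeyLt (a b : Int × Int × Int) : Bool :=
  a.1 > b.1 || (a.1 == b.1 && (a.2.1 > b.2.1 || (a.2.1 == b.2.1 && a.2.2 > b.2.2)))

-- list.sort(key=lambda x:(-x[0],-x[1],-x[2])): Python's stable sort, ported by hand as the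
-- stable insertion sort PySem.List.sorted is defined by (sorted_eq_foldl_insertBy), with the
-- tuple key written out as the explicit lexicographic comparison pvKeyLt (exact on Int triples).
def pvSortMinerals (xs : List (Int × Int × Int)) : List (Int × Int × Int) :=
  xs.foldl (fun acc x => PySem.List.insertBy (fun a b => pvKeyLt a b) x acc) []

-- the `for i in range(len(minerals))` bucket loop of A, as structural recursion carrying i
def pvFoldA : List String → Nat → List (Int × Int × Int) → List (Int × Int × Int)
  | [], _, acc => acc
  | x :: xs, i, acc =>
      pvFoldA xs (i + 1)
        (if x == "diamond" then acc.modify (i / 5) (fun t => (t.1 + 1, t.2.1, t.2.2))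
         else if x == "iron" then acc.modify (i / 5) (fun t => (t.1, t.2.1 + 1, t.2.2))
         else if x == "stone" then acc.modify (i / 5) (fun t => (t.1, t.2.1, t.2.2 + 1))
         else acc)

-- A's inner `for j in range(len(picks))` with break (j counts up; picks[j] is in range here)
def pvInner (picks : List Int) (j : Nat) (answer dia iron stone : Int) : List Int × Int :=
  if h : j < picks.length then
    let pj := picks[j]
    if pj > 0 && j == 0 then (picks.set j (pj - 1), answer + (dia + iron + stone))
    else if pj > 0 && j == 1 then (picks.set j (pj - 1), answer + (dia * 5 + iron + stone))
    else if pj > 0 && j == 2 then (picks.set j (pj - 1), answer + (dia * 25 + 5 * iron + stone))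
    else pvInner picks (j + 1) answer dia iron stone
  else (picks, answer)
termination_by picks.length - j

def solution (picks : List Int) (minerals : List String) : Int :=
  let answer : Int := 0
  let sum0 := picks.foldl (fun s i => s + i * 5) 0
  let minerals1 := if sum0 < (minerals.length : Int) then PySem.List.slice minerals none (some sum0) else minerals
  let newMinerals := pvFoldA minerals1 0 (List.replicate (minerals1.length / 5 + 1) (0, 0, 0))
  let sortedM := pvSortMinerals newMinerals
  (sortedM.foldl (fun (st : List Int × Int) g => pvInner st.1 0 st.2 g.1 g.2.1 g.2.2) (picks, answer)).2

-- ===== PORT B =====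
-- the `while p > 0 and blocks:` serving loop: Python's tuple `t > best` is exactly the
-- lexicographic comparison pvKeyLt already ported for A's sort key, so it is reused;: max-scan over blocks[1:] starting from
-- blocks[0], then `blocks.remove(best)` — best is an element of blocks, so Python's
-- .remove never raises and List.erase is exact here (PySem.List.remove?_eq_some_erase)
def pvServe (w : Int × Int × Int) (p : Int) (blocks : List (Int × Int × Int)) (total : Int) :
    List (Int × Int × Int) × Int :=
  match blocks with
  | [] => ([], total)
  | b0 :: bs =>
    if h : 0 < p then
      let best := bs.foldl (fun best t => if pvKeyLt t best then t else best) b0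
      pvServe w (p - 1) ((b0 :: bs).erase best)
        (total + best.1 * w.1 + best.2.1 * w.2.1 + best.2.2 * w.2.2)
    else (b0 :: bs, total)
termination_by p.toNat
decreasing_by omega

def solution_alt (picks : List Int) (minerals : List String) : Int :=
  let cap := 5 * picks.sum
  let minerals1 := if cap < (minerals.length : Int) then PySem.List.slice minerals none (some cap) else minerals
  let blocks := (PySem.List.pyRange 0 (PySem.Int.floordiv (minerals1.length : Int) 5 + 1) 1).map
    (fun b =>
      let chunk := PySem.List.slice minerals1 (some (5 * b)) (some (5 * b + 5))
      ((PySem.List.count chunk "diamond" : Int), (PySem.List.count chunk "iron" : Int),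
        (PySem.List.count chunk "stone" : Int)))
  ((List.zip [((1 : Int), (1 : Int), (1 : Int)), (5, 1, 1), (25, 5, 1)] picks).foldl
      (fun (st : List (Int × Int × Int) × Int) wp => pvServe wp.1 wp.2 st.1 st.2)
      (blocks, 0)).2

-- ===== PRECONDITION & SPEC =====
def Spec_solution (picks : List Int) (minerals : List String) (out : Int) : Prop := out = solution_alt picks minerals
instance (picks : List Int) (minerals : List String) (out : Int) : Decidable (Spec_solution picks minerals out) := by unfold Spec_solution; infer_instance

-- ===== CLAIM =====
def Claim_equal_solution : Prop := ∀ (picks : List Int) (minerals : List String), Dom_solution picks minerals → Spec_solution picks minerals (solution picks minerals)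

-- ===== LEMMAS AND PROOFS =====

-- ----- the lexicographic order on Int triples -----
lemma pvKeyLt_irrefl (a : Int × Int × Int) : pvKeyLt a a = false := by
  obtain ⟨a1, a2, a3⟩ := a; simp [pvKeyLt]

lemma pvKeyLt_asymm {a b : Int × Int × Int} (h : pvKeyLt a b = true) : pvKeyLt b a = false := by
  obtain ⟨a1, a2, a3⟩ := a; obtain ⟨b1, b2, b3⟩ := b
  simp [pvKeyLt] at h ⊢; omega

lemma pvKeyLt_antisymm {a b : Int × Int × Int} (h1 : pvKeyLt a b = false)
    (h2 : pvKeyLt b a = false) : a = b := by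
  obtain ⟨a1, a2, a3⟩ := a; obtain ⟨b1, b2, b3⟩ := b
  simp [pvKeyLt] at h1 h2
  simp only [Prod.mk.injEq]; omega

lemma pvKeyLt_trans_neg {a b c : Int × Int × Int} (h1 : pvKeyLt a b = false)
    (h2 : pvKeyLt b c = false) : pvKeyLt a c = false := by
  obtain ⟨a1, a2, a3⟩ := a; obtain ⟨b1, b2, b3⟩ := b; obtain ⟨c1, c2, c3⟩ := c
  simp [pvKeyLt] at h1 h2 ⊢; omega

-- ----- the max-scan of B returns a maximum element -----
lemma pvBest_mem : ∀ (bs : List (Int × Int × Int)) (b0 : Int × Int × Int),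
    bs.foldl (fun best t => if pvKeyLt t best then t else best) b0 ∈ b0 :: bs := by
  intro bs
  induction bs with
  | nil => intro b0; simp
  | cons t bs ih =>
      intro b0
      rw [List.foldl_cons]
      by_cases h : pvKeyLt t b0
      · simp only [h, if_pos]
        rcases List.mem_cons.mp (ih t) with h' | h' <;> simp [h']
      · simp only [h, Bool.false_eq_true, if_false]
        rcases List.mem_cons.mp (ih b0) with h' | h' <;> simp [h']

lemma pvBest_max : ∀ (bs : List (Int × Int × Int)) (b0 y : Int × Int × Int), y ∈ b0 :: bs →
    pvKeyLt y (bs.foldl (fun best t => if pvKeyLt t best then t else best) b0) = false := by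
  intro bs
  induction bs with
  | nil =>
      intro b0 y hy
      have hyb : y = b0 := by simpa using hy
      subst hyb
      simpa using pvKeyLt_irrefl y
  | cons t bs ih =>
      intro b0 y hy
      rw [List.foldl_cons]
      set c := if pvKeyLt t b0 then t else b0 with hc
      have hy0 : pvKeyLt b0 c = false := by
        by_cases h : pvKeyLt t b0
        · rw [hc, if_pos h]; exact pvKeyLt_asymm h
        · rw [hc, if_neg h]; exact pvKeyLt_irrefl b0
      have hyt : pvKeyLt t c = false := by
        by_cases h : pvKeyLt t b0
        · rw [hc, if_pos h]; exact pvKeyLt_irrefl t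
        · rw [hc, if_neg h]
          simpa using h
      have hcbest : pvKeyLt c (bs.foldl (fun best t => if pvKeyLt t best then t else best) c) = false :=
        ih c c (by simp)
      rcases List.mem_cons.mp hy with hy | hy
      · subst hy; exact pvKeyLt_trans_neg hy0 hcbest
      rcases List.mem_cons.mp hy with hy | hy
      · subst hy; exact pvKeyLt_trans_neg hyt hcbest
      · exact ih c y (List.mem_cons.mpr (Or.inr hy))

-- ----- the hand-ported stable sort: permutation, sortedness, uniqueness -----
lemma pvInsertBy_perm : ∀ (ys : List (Int × Int × Int)) (x : Int × Int × Int),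
    (PySem.List.insertBy (fun a b => pvKeyLt a b) x ys).Perm (x :: ys) := by
  intro ys
  induction ys with
  | nil => intro x; simp [PySem.List.insertBy]
  | cons y ys ih =>
      intro x
      rw [PySem.List.insertBy]
      by_cases h : pvKeyLt x y
      · simp [h]
      · simp only [h, Bool.false_eq_true, if_false]
        exact ((ih x).cons y).trans (List.Perm.swap x y ys)

lemma pvInsertBy_pairwise {ys : List (Int × Int × Int)} (x : Int × Int × Int)
    (hs : ys.Pairwise (fun a b => pvKeyLt b a = false)) :
    (PySem.List.insertBy (fun a b => pvKeyLt a b) x ys).Pairwise (fun a b => pvKeyLt b a = false) := by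
  induction ys with
  | nil => simp [PySem.List.insertBy, pvKeyLt_irrefl]
  | cons y ys ih =>
      rw [PySem.List.insertBy]
      rcases List.pairwise_cons.mp hs with ⟨hy, hys⟩
      by_cases h : pvKeyLt x y
      · simp only [h, if_pos]
        refine List.pairwise_cons.mpr ⟨?_, hs⟩
        intro z hz
        rcases List.mem_cons.mp hz with hz | hz
        · subst hz; exact pvKeyLt_asymm (by simpa using h)
        · exact pvKeyLt_trans_neg (hy z hz) (pvKeyLt_asymm h)
      · simp only [h, Bool.false_eq_true, if_false]
        refine List.pairwise_cons.mpr ⟨?_, ih hys⟩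
        intro z hz
        rcases (PySem.List.mem_insertBy _ _ _ _).mp hz with hz | hz
        · subst hz; simpa using h
        · exact hy z hz
  
lemma pvSort_perm (l : List (Int × Int × Int)) : (pvSortMinerals l).Perm l := by
  suffices h : ∀ (l acc : List (Int × Int × Int)),
      (l.foldl (fun acc x => PySem.List.insertBy (fun a b => pvKeyLt a b) x acc) acc).Perm (l ++ acc) by
    simpa [pvSortMinerals] using h l []
  intro l
  induction l with
  | nil => intro acc; simp
  | cons x l ih =>
      intro acc
      rw [List.foldl_cons]
      refine (ih _).trans ?_
      refine (List.Perm.append_left l (pvInsertBy_perm acc x)).trans ?_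
      simpa using List.perm_middle

lemma pvSort_sorted (l : List (Int × Int × Int)) :
    (pvSortMinerals l).Pairwise (fun a b => pvKeyLt b a = false) := by
  suffices h : ∀ (l acc : List (Int × Int × Int)),
      acc.Pairwise (fun a b => pvKeyLt b a = false) →
      (l.foldl (fun acc x => PySem.List.insertBy (fun a b => pvKeyLt a b) x acc) acc).Pairwise
        (fun a b => pvKeyLt b a = false) by
    exact h l [] (by simp)
  intro l
  induction l with
  | nil => intro acc hacc; simpa using hacc
  | cons x l ih =>
      intro acc hacc
      rw [List.foldl_cons]
      exact ih _ (pvInsertBy_pairwise x hacc)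

lemma pvSorted_unique {l1 l2 : List (Int × Int × Int)} (hp : l1.Perm l2)
    (h1 : l1.Pairwise (fun a b => pvKeyLt b a = false))
    (h2 : l2.Pairwise (fun a b => pvKeyLt b a = false)) : l1 = l2 :=
  List.eq_of_perm_of_sorted (fun a b _ _ hab hba => pvKeyLt_antisymm hba hab) h1 h2 hp

-- the head of the sorted list is the first maximum B's scan finds
lemma pvSort_cons_best (b0 : Int × Int × Int) (bs : List (Int × Int × Int)) :
    pvSortMinerals (b0 :: bs)
      = (bs.foldl (fun best t => if pvKeyLt t best then t else best) b0)
        :: pvSortMinerals ((b0 :: bs).erase (bs.foldl (fun best t => if pvKeyLt t best then t else best) b0)) := by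
  set best := bs.foldl (fun best t => if pvKeyLt t best then t else best) b0 with hbest
  have hmem : best ∈ b0 :: bs := pvBest_mem bs b0
  have hperm : (b0 :: bs).Perm (best :: (b0 :: bs).erase best) := List.perm_cons_erase hmem
  refine pvSorted_unique ?_ (pvSort_sorted _) ?_
  · exact (pvSort_perm _).trans (hperm.trans ((pvSort_perm _).symm.cons best))
  · refine List.pairwise_cons.mpr ⟨?_, pvSort_sorted _⟩
    intro z hz
    have hz' : z ∈ (b0 :: bs).erase best := ((pvSort_perm _).mem_iff).mp hz
    exact pvBest_max bs b0 z (List.mem_of_mem_erase hz')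

-- ----- scoring -----
def pvF (acc : Int) (gw : (Int × Int × Int) × (Int × Int × Int)) : Int :=
  acc + gw.1.1 * gw.2.1 + gw.1.2.1 * gw.2.2.1 + gw.1.2.2 * gw.2.2.2

def pvScore (l : List ((Int × Int × Int) × (Int × Int × Int))) : Int := l.foldl pvF 0

lemma pvFoldF_shift (l : List ((Int × Int × Int) × (Int × Int × Int))) : ∀ t : Int,
    l.foldl pvF t = t + pvScore l := by
  induction l with
  | nil => intro t; simp [pvScore]
  | cons x l ih =>
      intro t
      rw [pvScore, List.foldl_cons, List.foldl_cons, ih, ih (pvF 0 x)]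
      simp [pvF]; ring

lemma pvScore_cons (x : (Int × Int × Int) × (Int × Int × Int))
    (l : List ((Int × Int × Int) × (Int × Int × Int))) :
    pvScore (x :: l) = (x.1.1 * x.2.1 + x.1.2.1 * x.2.2.1 + x.1.2.2 * x.2.2.2) + pvScore l := by
  rw [pvScore, List.foldl_cons, pvFoldF_shift]; simp [pvF]

lemma pvScore_append (u v : List ((Int × Int × Int) × (Int × Int × Int))) :
    pvScore (u ++ v) = pvScore u + pvScore v := by
  rw [pvScore, List.foldl_append, pvFoldF_shift]; rfl

lemma pvZip_append_split {α β : Type} : ∀ (xs : List β) (l : List α) (ys : List β),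
    l.zip (xs ++ ys) = l.zip xs ++ (l.drop xs.length).zip ys := by
  intro xs
  induction xs with
  | nil => intro l ys; simp
  | cons x xs ih =>
      intro l ys
      cases l with
      | nil => simp
      | cons a l => simp [ih]

lemma pvZip_replicate_min {α β : Type} : ∀ (l : List α) (k : Nat) (w : β),
    l.zip (List.replicate k w) = l.zip (List.replicate (min k l.length) w) := by
  intro l
  induction l with
  | nil => intro k w; simp
  | cons a l ih =>
      intro k w
      cases k with
      | zero => simp
      | succ k => simp [List.replicate_succ, ih k w, Nat.succ_min_succ]

lemma pvDrop_min {α : Type} (l : List α) (k : Nat) : l.drop (min k l.length) = l.drop k := by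
  rcases Nat.le_total k l.length with h | h
  · rw [Nat.min_eq_left h]
  · rw [Nat.min_eq_right h, List.drop_length, List.drop_eq_nil_of_le h]

-- ----- the serving loop of B, against the sorted block list -----
lemma pvServe_eq (w : Int × Int × Int) : ∀ (p : Int) (blocks : List (Int × Int × Int)) (t : Int),
    pvSortMinerals (pvServe w p blocks t).1 = (pvSortMinerals blocks).drop p.toNat ∧
    (pvServe w p blocks t).2
      = t + pvScore ((pvSortMinerals blocks).zip (List.replicate p.toNat w)) := by
  intro p blocks t
  induction p, blocks, t using pvServe.induct w with
  | case1 tot => -- blocks = []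
      exact ⟨by simp [pvServe, pvSortMinerals], by simp [pvServe, pvSortMinerals, pvScore]⟩
  | case2 p tot hd tl h best ih =>
      rw [pvServe]
      simp only [dif_pos h]
      have hb : best = tl.foldl (fun best t => if pvKeyLt t best then t else best) hd := by
        simp only [best, dite_eq_ite]
        exact List.foldl_attach (f := fun best t => if pvKeyLt t best then t else best)
      rw [← hb]
      have hsort : pvSortMinerals (hd :: tl) = best :: pvSortMinerals ((hd :: tl).erase best) := by
        rw [hb]; exact pvSort_cons_best hd tl
      have hn : p.toNat = (p - 1).toNat + 1 := by omega
      rcases ih with ⟨ih1, ih2⟩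
      constructor
      · rw [ih1, hsort, hn]
        simp
      · rw [ih2, hsort, hn, List.replicate_succ, List.zip_cons_cons, pvScore_cons]
        ring
  | case3 p tot hd tl h =>
      have hp : p.toNat = 0 := by omega
      rw [pvServe]
      simp [h, hp, pvScore]

-- ----- the weight schedule -----
def pvW : Nat → Int × Int × Int
  | 0 => (1, 1, 1)
  | 1 => (5, 1, 1)
  | _ => (25, 5, 1)

-- the flat pick order of A's greedy selection (proof-side description)
def pvOrder : List Int → Nat → Nat → List Nat
  | [], _, _ => []
  | p :: ps, j, g =>
      let k := (min (max p 0) (g : Int)).toNat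
      List.replicate k j ++ pvOrder ps (j + 1) (g - k)

-- the weight sequence B serves with, capped at the remaining number of blocks
def pvWlist : List ((Int × Int × Int) × Int) → Nat → List (Int × Int × Int)
  | [], _ => []
  | (w, p) :: rest, g =>
      let k := min p.toNat g
      List.replicate k w ++ pvWlist rest (g - k)

-- B's outer fold over (weight, pick) pairs, as a score against the sorted blocks
lemma pvMain_fold : ∀ (wps : List ((Int × Int × Int) × Int)) (blocks : List (Int × Int × Int)) (t : Int),
    (wps.foldl (fun (st : List (Int × Int × Int) × Int) wp => pvServe wp.1 wp.2 st.1 st.2) (blocks, t)).2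
      = t + pvScore ((pvSortMinerals blocks).zip (pvWlist wps (pvSortMinerals blocks).length)) := by
  intro wps
  induction wps with
  | nil => intro blocks t; simp [pvWlist, pvScore]
  | cons wp rest ih =>
      intro blocks t
      obtain ⟨w, p⟩ := wp
      rw [List.foldl_cons]
      rcases pvServe_eq w p blocks t with ⟨h1, h2⟩
      have := ih (pvServe w p blocks t).1 (pvServe w p blocks t).2
      rw [Prod.mk.eta] at this
      rw [this, h1, h2]
      set s0 := pvSortMinerals blocks with hs0
      have hlen : (s0.drop p.toNat).length = s0.length - p.toNat := by simp
      rw [hlen]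
      show t + pvScore (s0.zip (List.replicate p.toNat w))
            + pvScore ((s0.drop p.toNat).zip (pvWlist rest (s0.length - p.toNat)))
          = t + pvScore (s0.zip (pvWlist ((w, p) :: rest) s0.length))
      have hk : pvWlist ((w, p) :: rest) s0.length
          = List.replicate (min p.toNat s0.length) w
            ++ pvWlist rest (s0.length - min p.toNat s0.length) := rfl
      rw [hk, pvZip_append_split, pvScore_append, List.length_replicate]
      rw [pvDrop_min, ← pvZip_replicate_min]
      have hsub : s0.length - min p.toNat s0.length = s0.length - p.toNat := by omega
      rw [hsub]
      ring

-- ----- A's greedy loop (from the old port): inner pick scan and its flat description -----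
lemma pvInner_ge3 (ps : List Int) : ∀ (n j : Nat) (a d i s : Int),
    ps.length - j ≤ n → 3 ≤ j → pvInner ps j a d i s = (ps, a) := by
  intro n
  induction n with
  | zero =>
      intro j a d i s hn hj
      rw [pvInner]
      have : ¬ j < ps.length := by omega
      simp [this]
  | succ n ih =>
      intro j a d i s hn hj
      rw [pvInner]
      by_cases h : j < ps.length
      · have hj0 : (j == 0) = false := by simp; omega
        have hj1 : (j == 1) = false := by simp; omega
        have hj2 : (j == 2) = false := by simp; omega
        simp only [h, dif_pos, hj0, hj1, hj2, Bool.and_false, Bool.false_eq_true, if_false]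
        exact ih (j + 1) a d i s (by omega) (by omega)
      · simp [h]

lemma pvScoreW_fold (l : List ((Int × Int × Int) × Nat)) : ∀ a : Int,
    l.foldl (fun acc gj => acc + (gj.1.1 * (pvW gj.2).1 + gj.1.2.1 * (pvW gj.2).2.1 + gj.1.2.2 * (pvW gj.2).2.2)) a
      = a + l.foldl (fun acc gj => acc + (gj.1.1 * (pvW gj.2).1 + gj.1.2.1 * (pvW gj.2).2.1 + gj.1.2.2 * (pvW gj.2).2.2)) 0 := by
  induction l with
  | nil => intro a; simp
  | cons x xs ih =>
      intro a
      rw [List.foldl_cons, List.foldl_cons, ih, ih (0 + _)]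
      ring

lemma pvOrder_pos (p : Int) (r : List Int) (j m : Nat) (h : 0 < p) :
    pvOrder (p :: r) j (m + 1) = j :: pvOrder ((p - 1) :: r) j m := by
  have hk : (min (max p 0) ((m + 1 : Nat) : Int)).toNat
      = (min (max (p - 1) 0) ((m : Nat) : Int)).toNat + 1 := by omega
  have hm : (m + 1) - ((min (max (p - 1) 0) ((m : Nat) : Int)).toNat + 1)
      = m - (min (max (p - 1) 0) ((m : Nat) : Int)).toNat := by omega
  simp only [pvOrder]
  rw [hk, List.replicate_succ, hm]
  simp

lemma pvOrder_nonpos (p : Int) (r : List Int) (j m : Nat) (h : p ≤ 0) :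
    pvOrder (p :: r) j m = pvOrder r (j + 1) m := by
  have hk : (min (max p 0) ((m : Nat) : Int)).toNat = 0 := by omega
  simp [pvOrder, hk]

lemma pvScoreW_cons (x : (Int × Int × Int) × Nat) (l : List ((Int × Int × Int) × Nat)) (a : Int) :
    ((x :: l).foldl (fun acc gj => acc + (gj.1.1 * (pvW gj.2).1 + gj.1.2.1 * (pvW gj.2).2.1 + gj.1.2.2 * (pvW gj.2).2.2)) a)
      = a + (x.1.1 * (pvW x.2).1 + x.1.2.1 * (pvW x.2).2.1 + x.1.2.2 * (pvW x.2).2.2)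
        + l.foldl (fun acc gj => acc + (gj.1.1 * (pvW gj.2).1 + gj.1.2.1 * (pvW gj.2).2.1 + gj.1.2.2 * (pvW gj.2).2.2)) 0 := by
  rw [List.foldl_cons, pvScoreW_fold]

-- the greedy loop of A equals the zip-with-flat-pick-order sum
lemma pvGreedy : ∀ (gs : List (Int × Int × Int)) (ps : List Int) (a : Int),
    (gs.foldl (fun (st : List Int × Int) g => pvInner st.1 0 st.2 g.1 g.2.1 g.2.2) (ps, a)).2
      = a + ((gs.zip (pvOrder (ps.take 3) 0 gs.length)).foldl
          (fun acc gj => acc + (gj.1.1 * (pvW gj.2).1 + gj.1.2.1 * (pvW gj.2).2.1 + gj.1.2.2 * (pvW gj.2).2.2)) 0) := by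
  intro gs
  induction gs with
  | nil => intro ps a; simp
  | cons g gs ih =>
    intro ps a
    rw [List.foldl_cons]
    rcases ps with _ | ⟨p0, ps⟩
    · have hinner : pvInner ([] : List Int) 0 a g.1 g.2.1 g.2.2 = ([], a) := by
        rw [pvInner]; simp
      rw [hinner, ih]
      simp [pvOrder]
    · rcases ps with _ | ⟨p1, ps⟩
      · -- picks = [p0]
        by_cases h0 : 0 < p0
        · have hinner : pvInner [p0] 0 a g.1 g.2.1 g.2.2
              = ([p0 - 1], a + (g.1 + g.2.1 + g.2.2)) := by
            rw [pvInner]; simp [h0]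
          rw [hinner, ih]
          simp only [List.take_succ_cons, List.take_nil, List.length_cons]
          rw [pvOrder_pos p0 [] 0 gs.length h0, List.zip_cons_cons, pvScoreW_cons]
          simp [pvW]; ring
        · have h1 : pvInner [p0] 1 a g.1 g.2.1 g.2.2 = ([p0], a) := by
            rw [pvInner]; simp
          have hinner : pvInner [p0] 0 a g.1 g.2.1 g.2.2 = ([p0], a) := by
            rw [pvInner]; simp [h0, h1]
          rw [hinner, ih]
          simp only [List.take_succ_cons, List.take_nil, List.length_cons]
          rw [pvOrder_nonpos p0 [] 0 (gs.length + 1) (by omega),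
            pvOrder_nonpos p0 [] 0 gs.length (by omega)]
          simp [pvOrder]
      · rcases ps with _ | ⟨p2, ps⟩
        · -- picks = [p0, p1]
          by_cases h0 : 0 < p0
          · have hinner : pvInner [p0, p1] 0 a g.1 g.2.1 g.2.2
                = ([p0 - 1, p1], a + (g.1 + g.2.1 + g.2.2)) := by
              rw [pvInner]; simp [h0]
            rw [hinner, ih]
            simp only [List.take_succ_cons, List.take_nil, List.length_cons]
            rw [pvOrder_pos p0 [p1] 0 gs.length h0, List.zip_cons_cons, pvScoreW_cons]
            simp [pvW]; ring
          · by_cases h1 : 0 < p1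
            · have hstep : pvInner [p0, p1] 1 a g.1 g.2.1 g.2.2
                  = ([p0, p1 - 1], a + (g.1 * 5 + g.2.1 + g.2.2)) := by
                rw [pvInner]; simp [h1]
              have hinner : pvInner [p0, p1] 0 a g.1 g.2.1 g.2.2
                  = ([p0, p1 - 1], a + (g.1 * 5 + g.2.1 + g.2.2)) := by
                rw [pvInner]; simp [h0, hstep]
              rw [hinner, ih]
              simp only [List.take_succ_cons, List.take_nil, List.length_cons]
              rw [pvOrder_nonpos p0 [p1] 0 (gs.length + 1) (by omega),
                pvOrder_pos p1 [] 1 gs.length h1,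
                pvOrder_nonpos p0 [p1 - 1] 0 gs.length (by omega),
                List.zip_cons_cons, pvScoreW_cons]
              simp [pvW]; ring
            · have h2 : pvInner [p0, p1] 2 a g.1 g.2.1 g.2.2 = ([p0, p1], a) := by
                rw [pvInner]; simp
              have hstep : pvInner [p0, p1] 1 a g.1 g.2.1 g.2.2 = ([p0, p1], a) := by
                rw [pvInner]; simp [h1, h2]
              have hinner : pvInner [p0, p1] 0 a g.1 g.2.1 g.2.2 = ([p0, p1], a) := by
                rw [pvInner]; simp [h0, hstep]
              rw [hinner, ih]
              simp only [List.take_succ_cons, List.take_nil, List.length_cons]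
              rw [pvOrder_nonpos p0 [p1] 0 (gs.length + 1) (by omega),
                pvOrder_nonpos p1 [] 1 (gs.length + 1) (by omega),
                pvOrder_nonpos p0 [p1] 0 gs.length (by omega),
                pvOrder_nonpos p1 [] 1 gs.length (by omega)]
              simp [pvOrder]
        · -- picks = p0 :: p1 :: p2 :: ps
          by_cases h0 : 0 < p0
          · have hinner : pvInner (p0 :: p1 :: p2 :: ps) 0 a g.1 g.2.1 g.2.2
                = ((p0 - 1) :: p1 :: p2 :: ps, a + (g.1 + g.2.1 + g.2.2)) := by
              rw [pvInner]; simp [h0]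
            rw [hinner, ih]
            simp only [List.take_succ_cons, List.take_zero, List.length_cons]
            rw [pvOrder_pos p0 [p1, p2] 0 gs.length h0, List.zip_cons_cons, pvScoreW_cons]
            simp [pvW]; ring
          · by_cases h1 : 0 < p1
            · have hstep : pvInner (p0 :: p1 :: p2 :: ps) 1 a g.1 g.2.1 g.2.2
                  = (p0 :: (p1 - 1) :: p2 :: ps, a + (g.1 * 5 + g.2.1 + g.2.2)) := by
                rw [pvInner]; simp [h1]
              have hinner : pvInner (p0 :: p1 :: p2 :: ps) 0 a g.1 g.2.1 g.2.2
                  = (p0 :: (p1 - 1) :: p2 :: ps, a + (g.1 * 5 + g.2.1 + g.2.2)) := by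
                rw [pvInner]; simp [h0, hstep]
              rw [hinner, ih]
              simp only [List.take_succ_cons, List.take_zero, List.length_cons]
              rw [pvOrder_nonpos p0 [p1, p2] 0 (gs.length + 1) (by omega),
                pvOrder_pos p1 [p2] 1 gs.length h1,
                pvOrder_nonpos p0 [p1 - 1, p2] 0 gs.length (by omega),
                List.zip_cons_cons, pvScoreW_cons]
              simp [pvW]; ring
            · by_cases h2 : 0 < p2
              · have hstep2 : pvInner (p0 :: p1 :: p2 :: ps) 2 a g.1 g.2.1 g.2.2
                    = (p0 :: p1 :: (p2 - 1) :: ps, a + (g.1 * 25 + 5 * g.2.1 + g.2.2)) := by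
                  rw [pvInner]; simp [h2]
                have hstep1 : pvInner (p0 :: p1 :: p2 :: ps) 1 a g.1 g.2.1 g.2.2
                    = (p0 :: p1 :: (p2 - 1) :: ps, a + (g.1 * 25 + 5 * g.2.1 + g.2.2)) := by
                  rw [pvInner]; simp [h1, hstep2]
                have hinner : pvInner (p0 :: p1 :: p2 :: ps) 0 a g.1 g.2.1 g.2.2
                    = (p0 :: p1 :: (p2 - 1) :: ps, a + (g.1 * 25 + 5 * g.2.1 + g.2.2)) := by
                  rw [pvInner]; simp [h0, hstep1]
                rw [hinner, ih]
                simp only [List.take_succ_cons, List.take_zero, List.length_cons]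
                rw [pvOrder_nonpos p0 [p1, p2] 0 (gs.length + 1) (by omega),
                  pvOrder_nonpos p1 [p2] 1 (gs.length + 1) (by omega),
                  pvOrder_pos p2 [] 2 gs.length h2,
                  pvOrder_nonpos p0 [p1, p2 - 1] 0 gs.length (by omega),
                  pvOrder_nonpos p1 [p2 - 1] 1 gs.length (by omega),
                  List.zip_cons_cons, pvScoreW_cons]
                simp [pvW]; ring
              · have hge3 : pvInner (p0 :: p1 :: p2 :: ps) 3 a g.1 g.2.1 g.2.2
                    = (p0 :: p1 :: p2 :: ps, a) :=
                  pvInner_ge3 (p0 :: p1 :: p2 :: ps) (p0 :: p1 :: p2 :: ps).length 3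
                    a g.1 g.2.1 g.2.2 (by omega) (by omega)
                have hstep2 : pvInner (p0 :: p1 :: p2 :: ps) 2 a g.1 g.2.1 g.2.2
                    = (p0 :: p1 :: p2 :: ps, a) := by
                  rw [pvInner]; simp [h2, hge3]
                have hstep1 : pvInner (p0 :: p1 :: p2 :: ps) 1 a g.1 g.2.1 g.2.2
                    = (p0 :: p1 :: p2 :: ps, a) := by
                  rw [pvInner]; simp [h1, hstep2]
                have hinner : pvInner (p0 :: p1 :: p2 :: ps) 0 a g.1 g.2.1 g.2.2
                    = (p0 :: p1 :: p2 :: ps, a) := by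
                  rw [pvInner]; simp [h0, hstep1]
                rw [hinner, ih]
                simp only [List.take_succ_cons, List.take_zero, List.length_cons]
                rw [pvOrder_nonpos p0 [p1, p2] 0 (gs.length + 1) (by omega),
                  pvOrder_nonpos p1 [p2] 1 (gs.length + 1) (by omega),
                  pvOrder_nonpos p2 [] 2 (gs.length + 1) (by omega),
                  pvOrder_nonpos p0 [p1, p2] 0 gs.length (by omega),
                  pvOrder_nonpos p1 [p2] 1 gs.length (by omega),
                  pvOrder_nonpos p2 [] 2 gs.length (by omega)]
                simp [pvOrder]

-- A's weighted index fold is the pvF fold over the pvW-mapped order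
lemma pvFoldW_eq_score (s0 : List (Int × Int × Int)) (order : List Nat) :
    (s0.zip order).foldl
        (fun acc gj => acc + (gj.1.1 * (pvW gj.2).1 + gj.1.2.1 * (pvW gj.2).2.1 + gj.1.2.2 * (pvW gj.2).2.2)) 0
      = pvScore (s0.zip (order.map pvW)) := by
  rw [pvScore, List.zip_map_right, List.foldl_map]
  apply List.foldl_ext
  intro acc gj _
  simp [pvF, Prod.map]; ring

-- the pvW-mapped flat pick order is B's capped weight schedule
lemma pvOrderW (picks : List Int) (g : Nat) :
    (pvOrder (picks.take 3) 0 g).map pvW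
      = pvWlist (List.zip [((1 : Int), (1 : Int), (1 : Int)), (5, 1, 1), (25, 5, 1)] picks) g := by
  rcases picks with _ | ⟨p0, _ | ⟨p1, _ | ⟨p2, rest⟩⟩⟩
  · simp [pvOrder, pvWlist]
  · have hk0 : (min (max p0 0) ((g : Nat) : Int)).toNat = min p0.toNat g := by omega
    simp only [List.take_succ_cons, List.take_nil, pvOrder, pvWlist, List.zip_cons_cons,
      List.zip_nil_right, List.map_append, List.map_replicate, hk0]
    simp [pvW, pvWlist, pvOrder]
  · have hk0 : (min (max p0 0) ((g : Nat) : Int)).toNat = min p0.toNat g := by omega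
    simp only [List.take_succ_cons, List.take_nil, pvOrder, pvWlist, List.zip_cons_cons,
      List.zip_nil_right, List.map_append, List.map_replicate, hk0]
    have hk1 : (min (max p1 0) ((g - min p0.toNat g : Nat) : Int)).toNat
        = min p1.toNat (g - min p0.toNat g) := by omega
    rw [hk1]
    simp [pvW, pvWlist, pvOrder]
  · have hk0 : (min (max p0 0) ((g : Nat) : Int)).toNat = min p0.toNat g := by omega
    simp only [List.take_succ_cons, List.take_zero, pvOrder, pvWlist, List.zip_cons_cons,
      List.map_append, List.map_replicate, hk0]
    have hk1 : (min (max p1 0) ((g - min p0.toNat g : Nat) : Int)).toNat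
        = min p1.toNat (g - min p0.toNat g) := by omega
    rw [hk1]
    have hk2 : (min (max p2 0) ((g - min p0.toNat g - min p1.toNat (g - min p0.toNat g) : Nat) : Int)).toNat
        = min p2.toNat (g - min p0.toNat g - min p1.toNat (g - min p0.toNat g)) := by omega
    rw [hk2]
    simp [pvW, pvWlist]

-- ----- A's bucket table equals B's slice/count blocks -----
lemma pvSum_eq (l : List Int) : ∀ a : Int, l.foldl (fun s i => s + i * 5) a = a + 5 * l.sum := by
  induction l with
  | nil => intro a; simp
  | cons x xs ih => intro a; simp [List.foldl_cons, ih]; ring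

lemma pvModify_append {α : Type} (gs : List α) (t : α) (rest : List α) (f : α → α) :
    (gs ++ t :: rest).modify gs.length f = gs ++ f t :: rest := by
  induction gs with
  | nil => simp [List.modify]
  | cons y ys ih =>
      have h : ((y :: ys) ++ t :: rest).modify (y :: ys).length f
          = y :: ((ys ++ t :: rest).modify ys.length f) := rfl
      rw [h, ih]; rfl

-- intermediate single-pass chunking (proof-side only)
def pvChunks : List String → List (Int × Int × Int) → Int → Int → Int → Nat → List (Int × Int × Int)
  | [], gs, d, i, s, _ => gs ++ [(d, i, s)]
  | x :: xs, gs, d, i, s, c =>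
      let t := if x == "diamond" then (d + 1, i, s)
               else if x == "iron" then (d, i + 1, s)
               else if x == "stone" then (d, i, s + 1)
               else (d, i, s)
      if c + 1 == 5 then pvChunks xs (gs ++ [t]) 0 0 0 0
      else pvChunks xs gs t.1 t.2.1 t.2.2 (c + 1)

-- the bucket invariant: A's growing table = finished chunks ++ current chunk ++ zero padding
lemma pvChunks_eq : ∀ (xs : List String) (gs : List (Int × Int × Int)) (d i s : Int) (c : Nat),
    c < 5 →
    pvFoldA xs (5 * gs.length + c) (gs ++ (d, i, s) :: List.replicate ((c + xs.length) / 5) (0, 0, 0))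
      = pvChunks xs gs d i s c := by
  intro xs
  induction xs with
  | nil =>
      intro gs d i s c hc
      have h0 : (c + ([] : List String).length) / 5 = 0 := by simp; omega
      simp [pvFoldA, pvChunks]
      omega
  | cons x xs ih =>
      intro gs d i s c hc
      have hidx : (5 * gs.length + c) / 5 = gs.length := by omega
      set t : Int × Int × Int :=
        (if x == "diamond" then (d + 1, i, s)
         else if x == "iron" then (d, i + 1, s)
         else if x == "stone" then (d, i, s + 1)
         else (d, i, s)) with ht
      have hstep :
          pvFoldA (x :: xs) (5 * gs.length + c) (gs ++ (d, i, s) :: List.replicate ((c + (x :: xs).length) / 5) (0, 0, 0))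
            = pvFoldA xs (5 * gs.length + c + 1) (gs ++ t :: List.replicate ((c + (x :: xs).length) / 5) (0, 0, 0)) := by
        by_cases h1 : x == "diamond"
        · simp [pvFoldA, h1, hidx, pvModify_append, ht]
        · by_cases h2 : x == "iron"
          · simp [pvFoldA, h1, h2, hidx, pvModify_append, ht]
          · by_cases h3 : x == "stone"
            · simp [pvFoldA, h1, h2, h3, hidx, pvModify_append, ht]
            · simp [pvFoldA, h1, h2, h3, ht]
      have hunfold : pvChunks (x :: xs) gs d i s c
          = if c + 1 == 5 then pvChunks xs (gs ++ [t]) 0 0 0 0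
            else pvChunks xs gs t.1 t.2.1 t.2.2 (c + 1) := by
        simp only [pvChunks, ← ht]
      rw [hstep, hunfold]
      by_cases hc5 : c + 1 = 5
      · have hb : (c + 1 == 5) = true := by simpa using hc5
        have hrep : (c + (x :: xs).length) / 5 = (0 + xs.length) / 5 + 1 := by
          simp; omega
        have hsh : gs ++ t :: List.replicate ((0 + xs.length) / 5 + 1) (0, 0, 0)
            = (gs ++ [t]) ++ (0, 0, 0) :: List.replicate ((0 + xs.length) / 5) (0, 0, 0) := by
          simp [List.replicate_succ]
        have hlen : 5 * gs.length + c + 1 = 5 * (gs ++ [t]).length + 0 := by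
          simp; omega
        rw [hb, if_pos rfl, hrep, hsh, hlen]
        exact ih (gs ++ [t]) 0 0 0 0 (by omega)
      · have hb : (c + 1 == 5) = false := by simpa using hc5
        have hrep : (c + (x :: xs).length) / 5 = ((c + 1) + xs.length) / 5 := by
          simp; omega
        have hlen : 5 * gs.length + c + 1 = 5 * gs.length + (c + 1) := by omega
        rw [hb, if_neg (by simp), hrep, hlen]
        exact ih gs t.1 t.2.1 t.2.2 (c + 1) (by omega)

lemma pvBuckets_eq (m : List String) :
    pvFoldA m 0 (List.replicate (m.length / 5 + 1) (0, 0, 0)) = pvChunks m [] 0 0 0 0 := by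
  have h := pvChunks_eq m [] 0 0 0 0 (by omega)
  simpa [List.replicate_succ] using h

-- the counts of one chunk
def pvCnt (l : List String) : Int × Int × Int :=
  ((PySem.List.count l "diamond" : Int), (PySem.List.count l "iron" : Int),
    (PySem.List.count l "stone" : Int))

-- chunk decomposition, five at a time (proof-side only)
def pvChunkList (m : List String) : List (Int × Int × Int) :=
  if h : 5 ≤ m.length then pvCnt (m.take 5) :: pvChunkList (m.drop 5) else [pvCnt m]
termination_by m.length
decreasing_by simp; omega

lemma pvCnt_append_singleton (p : List String) (x : String) :
    pvCnt (p ++ [x])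
      = (if x == "diamond" then ((pvCnt p).1 + 1, (pvCnt p).2.1, (pvCnt p).2.2)
         else if x == "iron" then ((pvCnt p).1, (pvCnt p).2.1 + 1, (pvCnt p).2.2)
         else if x == "stone" then ((pvCnt p).1, (pvCnt p).2.1, (pvCnt p).2.2 + 1)
         else pvCnt p) := by
  by_cases h1 : x == "diamond"
  · simp_all [pvCnt, PySem.List.count_eq, List.count_append, List.count_singleton]
  · by_cases h2 : x == "iron"
    · simp_all [pvCnt, PySem.List.count_eq, List.count_append, List.count_singleton]
    · by_cases h3 : x == "stone"
      · simp_all [pvCnt, PySem.List.count_eq, List.count_append, List.count_singleton]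
      · simp_all [pvCnt, PySem.List.count_eq, List.count_append, List.count_singleton]

lemma pvChunks_eq_chunkList : ∀ (xs p : List String) (gs : List (Int × Int × Int)),
    p.length < 5 →
    pvChunks xs gs (pvCnt p).1 (pvCnt p).2.1 (pvCnt p).2.2 p.length
      = gs ++ pvChunkList (p ++ xs) := by
  intro xs
  induction xs with
  | nil =>
      intro p gs hp
      have h5 : ¬ 5 ≤ p.length := by omega
      rw [List.append_nil, pvChunkList, dif_neg h5, pvChunks]
  | cons x xs ih =>
      intro p gs hp
      rw [pvChunks]
      have ht : (if x == "diamond" then ((pvCnt p).1 + 1, (pvCnt p).2.1, (pvCnt p).2.2)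
         else if x == "iron" then ((pvCnt p).1, (pvCnt p).2.1 + 1, (pvCnt p).2.2)
         else if x == "stone" then ((pvCnt p).1, (pvCnt p).2.1, (pvCnt p).2.2 + 1)
         else ((pvCnt p).1, (pvCnt p).2.1, (pvCnt p).2.2)) = pvCnt (p ++ [x]) := by
        rw [pvCnt_append_singleton]
      rw [ht]
      by_cases hc5 : p.length + 1 = 5
      · have hb : (p.length + 1 == 5) = true := by simpa using hc5
        rw [hb, if_pos rfl]
        have hcnil : pvCnt ([] : List String) = (0, 0, 0) := rfl
        have h0 := ih [] (gs ++ [pvCnt (p ++ [x])]) (by simp)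
        rw [hcnil] at h0
        simp only [List.length_nil, List.nil_append] at h0
        rw [h0]
        have hsplit : p ++ x :: xs = (p ++ [x]) ++ xs := by simp
        have hlen : (p ++ [x]).length = 5 := by simp; omega
        have hR : pvChunkList ((p ++ [x]) ++ xs) = pvCnt (p ++ [x]) :: pvChunkList xs := by
          rw [pvChunkList, dif_pos (by simp; omega),
            List.take_left' hlen, List.drop_left' hlen]
        rw [hsplit, hR]
        simp
      · have hb : (p.length + 1 == 5) = false := by simpa using hc5
        rw [hb, if_neg (by simp)]
        have h1 := ih (p ++ [x]) gs (by simp; omega)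
        simp only [List.length_append, List.length_singleton] at h1
        rw [h1]
        simp

lemma pvChunks_zero (m : List String) : pvChunks m [] 0 0 0 0 = pvChunkList m := by
  have h := pvChunks_eq_chunkList m [] [] (by simp)
  simpa [pvCnt] using h

lemma pvRangeBlocks : ∀ (m : List String),
    (List.range (m.length / 5 + 1)).map (fun k => pvCnt ((m.drop (5 * k)).take 5))
      = pvChunkList m := by
  intro m
  induction m using pvChunkList.induct with
  | case1 m h ih =>
      rw [pvChunkList, dif_pos h]
      have hg : m.length / 5 + 1 = ((m.length - 5) / 5 + 1) + 1 := by omega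
      rw [hg, List.range_succ_eq_map, List.map_cons, List.map_map]
      simp only [List.length_drop] at ih
      congr 1
      · rw [← ih]
        apply List.map_congr_left
        intro k hk
        have hdd : m.drop (5 * (k + 1)) = (m.drop 5).drop (5 * k) := by
          rw [List.drop_drop]
          congr 1
          omega
        simp [Function.comp, Nat.succ_eq_add_one, hdd]
  | case2 m h =>
      rw [pvChunkList, dif_neg h]
      have hg : m.length / 5 + 1 = 1 := by omega
      rw [hg]
      simp [List.range_one, List.take_of_length_le (by omega : m.length ≤ 5)]

lemma pvBlocks_eq (m : List String) :
    (PySem.List.pyRange 0 (PySem.Int.floordiv (m.length : Int) 5 + 1) 1).map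
      (fun b =>
        let chunk := PySem.List.slice m (some (5 * b)) (some (5 * b + 5))
        ((PySem.List.count chunk "diamond" : Int), (PySem.List.count chunk "iron" : Int),
          (PySem.List.count chunk "stone" : Int)))
      = pvChunkList m := by
  have hfd : PySem.Int.floordiv (m.length : Int) 5 + 1 = ((m.length / 5 + 1 : Nat) : Int) := by
    have h1 := PySem.Int.floordiv_natCast m.length 5
    push_cast
    push_cast at h1
    rw [h1]
  rw [hfd, PySem.List.pyRange_zero_nat, List.map_map]
  rw [← pvRangeBlocks m]
  apply List.map_congr_left
  intro k _
  have hsl : PySem.List.slice m (some (5 * ((k : Nat) : Int))) (some (5 * ((k : Nat) : Int) + 5))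
      = (m.drop (5 * k)).take 5 := by
    have h2 := PySem.List.slice_natCast m (5 * k) (5 * k + 5)
    have hc1 : ((5 * k : Nat) : Int) = 5 * ((k : Nat) : Int) := by push_cast; ring
    have hc2 : ((5 * k + 5 : Nat) : Int) = 5 * ((k : Nat) : Int) + 5 := by push_cast; ring
    rw [hc1, hc2] at h2
    rw [h2]
    congr 1
    omega
  simp only [Function.comp, hsl, pvCnt]

-- connecting A's bucket table to B's block list, verbatim as they appear in the ports
lemma pvBlocksFinal (m : List String) :
    pvFoldA m 0 (List.replicate (m.length / 5 + 1) (0, 0, 0))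
      = (PySem.List.pyRange 0 (PySem.Int.floordiv (m.length : Int) 5 + 1) 1).map
          (fun b =>
            let chunk := PySem.List.slice m (some (5 * b)) (some (5 * b + 5))
            ((PySem.List.count chunk "diamond" : Int), (PySem.List.count chunk "iron" : Int),
              (PySem.List.count chunk "stone" : Int))) := by
  rw [pvBuckets_eq, pvChunks_zero, pvBlocks_eq]

-- the two greedarticulations agree for any block list and any pick list
lemma pvKey (blocks : List (Int × Int × Int)) (ps : List Int) :
    ((pvSortMinerals blocks).foldl
        (fun (st : List Int × Int) g => pvInner st.1 0 st.2 g.1 g.2.1 g.2.2) (ps, (0 : Int))).2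
      = ((List.zip [((1 : Int), (1 : Int), (1 : Int)), (5, 1, 1), (25, 5, 1)] ps).foldl
          (fun (st : List (Int × Int × Int) × Int) wp => pvServe wp.1 wp.2 st.1 st.2)
          (blocks, 0)).2 := by
  rw [pvGreedy, pvMain_fold, zero_add, zero_add, pvFoldW_eq_score, pvOrderW]

-- ===== VERDICT (by name: the statement is the Claim_ definition above) =====
theorem solution_spec : Claim_equal_solution := by
  intro picks minerals _
  unfold Spec_solution solution solution_alt
  simp only [pvSum_eq, zero_add]
  rw [pvBlocksFinal]
  exact pvKey _ picks
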